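-- pv_equiv track=rewrite | github.com/gaus-1/pandapal-bot | bot/utils/chat_utils.py | count_user_messages_since_name_mention
-- ===== SOURCE A (Python) =====
-- def count_user_messages_since_name_mention(history: list[dict], user_first_name: str | None) -> int:
--     """
--     Подсчет количества сообщений пользователя с момента последнего упоминания его имени ИИ.
--
--     Args:
--         history: История чата в формате [{"role": "...", "text": "..."}, ...]
--         user_first_name: Имя пользователя
--
--     Returns:
--         int: Количество сообщений от пользователя (роль "user")
--     """
--     user_message_count = 0
--     if user_first_name:
--         # Ищем последнее упоминание имени AI (в любом виде)
--         last_name_mention_index = -1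
--         for i, msg in enumerate(history):
--             if (
--                 msg.get("role") == "assistant"
--                 and user_first_name.lower() in msg.get("text", "").lower()
--             ):
--                 last_name_mention_index = i
--                 break
--
--         # Если упоминание найдено
--         if last_name_mention_index >= 0:
--             # Считаем только user-сообщения
--             user_message_count = sum(
--                 1 for msg in history[last_name_mention_index + 1 :] if msg.get("role") == "user"
--             )
--         else:
--             # Если имени нет в ответах ИИ - считаем все
--             user_message_count = sum(1 for msg in history if msg.get("role") == "user")
--     else:
--         # Если имени у юзера вообще нет - считаем все
--         user_message_count = sum(1 for msg in history if msg.get("role") == "user")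
--
--     return user_message_count
-- ===== SOURCE B (Python) =====
-- def count_user_messages_since_name_mention(history: list[dict], user_first_name: str | None) -> int:
--     """Single stateful pass: reset the user-message counter at AI's first name mention."""
--     count = 0
--     found = False
--     for msg in history:
--         if (
--             user_first_name
--             and not found
--             and msg.get("role") == "assistant"
--             and user_first_name.lower() in msg.get("text", "").lower()
--         ):
--             found = True
--             count = 0
--         elif msg.get("role") == "user":
--             count += 1
--     return count
-- ===== Notes on version B (the rewrite author's own statement) =====
-- stated objective: simpler
-- what changed: Replaces A's two sequential scans (enumerate-with-break to find the first mention index, then a slice-and-sum pass) with one stateful pass keeping a running count that is reset at the first mention, so no index or slice is ever built.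
import Mathlib
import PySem

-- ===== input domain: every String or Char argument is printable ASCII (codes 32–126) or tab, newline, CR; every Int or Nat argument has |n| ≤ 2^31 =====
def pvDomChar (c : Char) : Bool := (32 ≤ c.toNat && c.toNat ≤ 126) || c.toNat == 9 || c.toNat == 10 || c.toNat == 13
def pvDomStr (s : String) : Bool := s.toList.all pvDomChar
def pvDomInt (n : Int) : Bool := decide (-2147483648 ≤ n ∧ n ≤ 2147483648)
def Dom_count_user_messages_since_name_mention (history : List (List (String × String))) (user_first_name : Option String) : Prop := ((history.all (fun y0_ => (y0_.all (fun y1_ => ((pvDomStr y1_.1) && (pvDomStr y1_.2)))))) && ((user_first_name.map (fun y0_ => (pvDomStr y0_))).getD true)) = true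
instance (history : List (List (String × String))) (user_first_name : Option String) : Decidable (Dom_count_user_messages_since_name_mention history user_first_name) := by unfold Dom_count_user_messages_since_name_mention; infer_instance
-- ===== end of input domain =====

-- B replaces A's two sequential scans (find-first-mention-index, then slice and sum) by a
-- single stateful pass that resets a running user-message counter at the first mention (simpler).

-- ===== PORT A =====
-- msg.get("role") == "user" (None ≠ "user")
def pvIsUser (msg : List (String × String)) : Bool := msg.lookup "role" == some "user"

-- msg.get("role") == "assistant" and name.lower() in msg.get("text", "").lower()
def pvMention (name : String) (msg : List (String × String)) : Bool :=
  (msg.lookup "role" == some "assistant") &&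
    PySem.Str.isIn (PySem.Str.lower name) (PySem.Str.lower ((msg.lookup "text").getD ""))

-- sum(1 for msg in xs if msg.get("role") == "user")
def pvCountUsers (xs : List (List (String × String))) : Int :=
  xs.foldl (fun a m => if pvIsUser m then a + 1 else a) 0

-- A's enumerate loop with break: index of the first mention, -1 if none
def pvFirstMention (name : String) : List (List (String × String)) → Int → Int
  | [], _ => -1
  | m :: t, i => if pvMention name m then i else pvFirstMention name t (i + 1)

def count_user_messages_since_name_mention (history : List (List (String × String))) (user_first_name : Option String) : Int :=
  match user_first_name with
  | none => pvCountUsers history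
  | some name =>
    if name == "" then pvCountUsers history
    else
      let idx := pvFirstMention name history 0
      if 0 ≤ idx then pvCountUsers (PySem.List.slice history (some (idx + 1)) none)
      else pvCountUsers history

-- ===== PORT B =====
-- user_first_name and (not found) and msg.get("role") == "assistant" and name.lower() in msg.get("text","").lower()
def pvCondB (user_first_name : Option String) (msg : List (String × String)) : Bool :=
  match user_first_name with
  | none => false
  | some n => !(n == "") && pvMention n msg

def pvStep (user_first_name : Option String) (st : Bool × Int) (msg : List (String × String)) : Bool × Int :=
  if pvCondB user_first_name msg && !st.1 then (true, 0)
  else if pvIsUser msg then (st.1, st.2 + 1)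
  else st

def count_user_messages_since_name_mention_alt (history : List (List (String × String))) (user_first_name : Option String) : Int :=
  (history.foldl (pvStep user_first_name) (false, 0)).2

-- ===== PRECONDITION & SPEC =====
def Spec_count_user_messages_since_name_mention (history : List (List (String × String))) (user_first_name : Option String) (out : Int) : Prop := out = count_user_messages_since_name_mention_alt history user_first_name
instance (history : List (List (String × String))) (user_first_name : Option String) (out : Int) : Decidable (Spec_count_user_messages_since_name_mention history user_first_name out) := by unfold Spec_count_user_messages_since_name_mention; infer_instance

-- ===== CLAIM (what is proved, stated in full; the proofs are below) =====
def Claim_equal_count_user_messages_since_name_mention : Prop := ∀ (history : List (List (String × String))) (user_first_name : Option String), Dom_count_user_messages_since_name_mention history user_first_name → Spec_count_user_messages_since_name_mention history user_first_name (count_user_messages_since_name_mention history user_first_name)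

-- ===== LEMMAS AND PROOFS =====
-- count of user messages after the first message satisfying q (0 if none): common shape of both results
def pvAfterQ (q : List (String × String) → Bool) : List (List (String × String)) → Int
  | [] => 0
  | m :: t => if q m then pvCountUsers t else pvAfterQ q t

theorem pvFoldCount (t : List (List (String × String))) (c : Int) :
    List.foldl (fun a m => if pvIsUser m then a + 1 else a) c t =
      c + List.foldl (fun a m => if pvIsUser m then a + 1 else a) 0 t := by
  induction t generalizing c with
  | nil => simp
  | cons m t ih =>
    rw [List.foldl_cons, List.foldl_cons]
    split_ifs with h
    · rw [ih (c + 1), ih (0 + 1)]; omega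
    · rw [ih c]

theorem pvCountUsers_cons (m : List (String × String)) (t : List (List (String × String))) :
    pvCountUsers (m :: t) = (if pvIsUser m then 1 else 0) + pvCountUsers t := by
  simp only [pvCountUsers, List.foldl_cons]
  rw [pvFoldCount]
  split_ifs <;> omega

theorem pvB_found (n? : Option String) (t : List (List (String × String))) (c : Int) :
    List.foldl (pvStep n?) (true, c) t = (true, c + pvCountUsers t) := by
  induction t generalizing c with
  | nil => simp [pvCountUsers]
  | cons m t ih =>
    simp only [List.foldl_cons, pvStep, Bool.not_true, Bool.and_false, Bool.false_eq_true,
      if_false]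
    by_cases hu : pvIsUser m = true
    · rw [if_pos hu, ih (c + 1), pvCountUsers_cons]
      simp [hu]; omega
    · rw [if_neg hu, ih c, pvCountUsers_cons]
      simp [hu]

theorem pvFirstMention_nonneg (n : String) (t : List (List (String × String))) (j : Int)
    (hj : 0 ≤ j) : pvFirstMention n t j = -1 ∨ j ≤ pvFirstMention n t j := by
  induction t generalizing j with
  | nil => left; rfl
  | cons m t ih =>
    simp only [pvFirstMention]
    split
    · right; exact le_refl j
    · rcases ih (j + 1) (by omega) with h | h
      · left; exact h
      · right; omega

theorem pvFirstMention_shift (n : String) (t : List (List (String × String))) (j : Int) :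
    pvFirstMention n t j =
      if pvFirstMention n t 0 = -1 then -1 else j + pvFirstMention n t 0 := by
  induction t generalizing j with
  | nil => simp [pvFirstMention]
  | cons m t ih =>
    simp only [pvFirstMention]
    by_cases h : pvMention n m = true
    · rw [if_pos h, if_pos h]; norm_num
    · rw [if_neg h, if_neg h, show (0 : Int) + 1 = 1 from rfl, ih (j + 1), ih 1]
      rcases pvFirstMention_nonneg n t 0 le_rfl with h0 | h0
      · simp [h0]
      · split_ifs <;> omega

theorem pvFirstMention_neg_iff (n : String) (t : List (List (String × String))) :
    pvFirstMention n t 0 = -1 ↔ t.all (fun m => !pvMention n m) = true := by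
  induction t with
  | nil => simp [pvFirstMention]
  | cons m t ih =>
    simp only [pvFirstMention, List.all_cons]
    by_cases h : pvMention n m = true
    · rw [if_pos h]; simp [h]
    · rw [if_neg h, show (0 : Int) + 1 = 1 from rfl, pvFirstMention_shift n t 1]
      rcases pvFirstMention_nonneg n t 0 le_rfl with h0 | h0
      · have hall := ih.mp h0
        simp [h0, h]
        intro x hx
        simpa using List.all_eq_true.mp hall x hx
      · have hne : pvFirstMention n t 0 ≠ -1 := by omega
        rw [if_neg hne]
        simp only [Bool.not_eq_true] at h
        simp only [h, Bool.not_false, Bool.true_and, ← ih]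
        omega

theorem pvA_body (n : String) (t : List (List (String × String))) :
    (if 0 ≤ pvFirstMention n t 0
      then pvCountUsers (PySem.List.slice t (some (pvFirstMention n t 0 + 1)) none)
      else pvCountUsers t)
    = if t.all (fun m => !pvMention n m) then pvCountUsers t else pvAfterQ (pvMention n) t := by
  induction t with
  | nil => simp [pvFirstMention]
  | cons m t ih =>
    simp only [pvFirstMention, List.all_cons, pvAfterQ]
    by_cases h : pvMention n m = true
    · rw [if_pos h, if_pos h, if_pos (le_refl (0 : Int)),
        PySem.List.slice_from _ (by norm_num : (0 : Int) ≤ 0 + 1)]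
      simp [h]
    · rw [if_neg h, if_neg h, show (0 : Int) + 1 = 1 from rfl, pvFirstMention_shift n t 1]
      rcases pvFirstMention_nonneg n t 0 le_rfl with h0 | h0
      · have hall := (pvFirstMention_neg_iff n t).mp h0
        rw [if_pos h0]
        simp [hall, h]
      · have hne : pvFirstMention n t 0 ≠ -1 := by omega
        have hallf : ¬ (t.all (fun m => !pvMention n m) = true) := fun hc =>
          hne ((pvFirstMention_neg_iff n t).mpr hc)
        rw [if_neg hne, if_pos (show (0 : Int) ≤ 1 + pvFirstMention n t 0 by omega),
          PySem.List.slice_from _ (show (0 : Int) ≤ 1 + pvFirstMention n t 0 + 1 by omega),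
          show (1 + pvFirstMention n t 0 + 1).toNat = (pvFirstMention n t 0 + 1).toNat + 1
            from by omega,
          List.drop_succ_cons]
        rw [if_pos h0, PySem.List.slice_from _ (show (0 : Int) ≤ pvFirstMention n t 0 + 1 by omega)] at ih
        rw [ih]
        simp [hallf, h]

theorem pvB_main (n? : Option String) (t : List (List (String × String))) (c : Int) :
    (List.foldl (pvStep n?) (false, c) t).2 =
      if t.all (fun m => !pvCondB n? m) then c + pvCountUsers t
      else pvAfterQ (pvCondB n?) t := by
  induction t generalizing c with
  | nil => simp [pvCountUsers]
  | cons m t ih =>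
    simp only [List.foldl_cons, pvStep, List.all_cons, pvAfterQ]
    by_cases h : pvCondB n? m = true
    · rw [if_pos (by simp [h] : (pvCondB n? m && !(false, c).1) = true), pvB_found]
      simp [h]
    · rw [if_neg (by simp [h] : ¬ ((pvCondB n? m && !(false, c).1) = true))]
      by_cases hu : pvIsUser m = true
      · rw [if_pos hu, show ((false, c).1, (false, c).2 + 1) = ((false : Bool), c + 1) from rfl,
          ih (c + 1)]
        by_cases ha : (t.all fun m => !pvCondB n? m) = true
        · simp [ha, h, hu, pvCountUsers_cons]; omega
        · simp [ha, h]
      · rw [if_neg hu, ih c]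
        by_cases ha : (t.all fun m => !pvCondB n? m) = true
        · simp [ha, h, hu, pvCountUsers_cons]
        · simp [ha, h]

-- ===== VERDICT (by name: the statement is the Claim_ definition above) =====
theorem count_user_messages_since_name_mention_spec : Claim_equal_count_user_messages_since_name_mention := by
  intro history name? _
  unfold Spec_count_user_messages_since_name_mention
  unfold count_user_messages_since_name_mention count_user_messages_since_name_mention_alt
  rw [pvB_main]
  cases name? with
  | none =>
    have hall : (history.all fun m => !pvCondB none m) = true := by simp [pvCondB]
    rw [if_pos hall]
    show pvCountUsers history = 0 + pvCountUsers history
    omega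
  | some n =>
    by_cases hn : n = ""
    · subst hn
      have hall : (history.all fun m => !pvCondB (some "") m) = true := by simp [pvCondB]
      rw [if_pos hall]
      show pvCountUsers history = 0 + pvCountUsers history
      omega
    · have hcond : pvCondB (some n) = pvMention n := by funext m; simp [pvCondB, hn]
      have hb : ¬ ((n == "") = true) := by simp [hn]
      rw [hcond]
      simp only [zero_add]
      show (if (n == "") = true then pvCountUsers history else _) = _
      rw [if_neg hb]
      exact pvA_body n history
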